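-- pv_equiv track=rewrite | github.com/kevin032050-coder/ChemDraw-Style-Molecule-Whiteboard | TP.py | enumerateStereoisomers
-- ===== SOURCE A (Python) =====
-- import copy
--
-- def enumerateStereoisomers(elements, bonds, stereocenters, index=0,
--                             currentConfig=None, allConfigs=None):
--
--     if currentConfig is None:
--         currentConfig = []
--     if allConfigs is None:
--         allConfigs = []
--     #base case
--     if index == (len(stereocenters["chiralCenters"]) +
--                 len(stereocenters["doubleBonds"])):
--         allConfigs.append(copy.copy(currentConfig))
--         return allConfigs
--
--     #recursive case
--     if index < len(stereocenters["chiralCenters"]):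
--         #backtracking
--         for stereo in ["@", "@@"]:
--             currentConfig.append(stereo)
--             enumerateStereoisomers(elements, bonds, stereocenters, index + 1,
--                                     currentConfig, allConfigs)
--             currentConfig.pop()
--     else:
--         for stereo in ["/", "\\"]:
--             currentConfig.append(stereo)
--             enumerateStereoisomers(elements, bonds, stereocenters, index + 1,
--                                     currentConfig, allConfigs)
--             currentConfig.pop()
--
--     return allConfigs
-- ===== SOURCE B (Python) =====
-- def enumerateStereoisomers(elements, bonds, stereocenters, index=0,
--                             currentConfig=None, allConfigs=None):
--     if currentConfig is None:
--         currentConfig = []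
--     if allConfigs is None:
--         allConfigs = []
--     nChiral = len(stereocenters["chiralCenters"])
--     total = nChiral + len(stereocenters["doubleBonds"])
--     combos = [[]]
--     for i in range(index, total):
--         choice = ["@", "@@"] if i < nChiral else ["/", "\\"]
--         combos = [c + [s] for c in combos for s in choice]
--     for c in combos:
--         allConfigs.append(currentConfig + c)
--     return allConfigs
-- ===== Notes on version B (the rewrite author's own statement) =====
-- stated objective: simpler
-- what changed: Replaces A's recursive backtracking (append/recurse/pop with a shared mutable currentConfig) by a single iterative cartesian-product build: one loop extends a combos list by each position's two choices, then the combos are appended to allConfigs.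
import Mathlib
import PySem

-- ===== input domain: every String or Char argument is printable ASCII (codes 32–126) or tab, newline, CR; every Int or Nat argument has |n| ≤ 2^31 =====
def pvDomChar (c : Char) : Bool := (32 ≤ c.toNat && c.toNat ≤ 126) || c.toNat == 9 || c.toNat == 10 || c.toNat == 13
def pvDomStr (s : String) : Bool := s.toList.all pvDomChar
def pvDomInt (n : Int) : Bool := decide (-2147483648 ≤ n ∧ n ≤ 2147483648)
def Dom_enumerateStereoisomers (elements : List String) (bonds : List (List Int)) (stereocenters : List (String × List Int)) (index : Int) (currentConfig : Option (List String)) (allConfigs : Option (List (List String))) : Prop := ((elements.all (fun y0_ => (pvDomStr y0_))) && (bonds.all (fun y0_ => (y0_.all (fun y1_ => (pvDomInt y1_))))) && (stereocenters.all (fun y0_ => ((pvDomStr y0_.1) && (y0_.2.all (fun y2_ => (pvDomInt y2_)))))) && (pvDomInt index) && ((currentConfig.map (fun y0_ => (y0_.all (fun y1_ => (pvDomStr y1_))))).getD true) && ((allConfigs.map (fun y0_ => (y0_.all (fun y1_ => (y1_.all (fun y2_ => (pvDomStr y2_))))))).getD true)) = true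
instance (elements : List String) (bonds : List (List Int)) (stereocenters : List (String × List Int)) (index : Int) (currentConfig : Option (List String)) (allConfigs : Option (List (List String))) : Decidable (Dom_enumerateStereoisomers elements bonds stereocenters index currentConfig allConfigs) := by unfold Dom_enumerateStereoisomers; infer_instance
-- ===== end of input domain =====

-- B replaces A's recursive backtracking with an iterative cartesian-product build (simpler
-- decomposition, same cost). Equivalence is about the RETURN value only: the Python A mutates
-- the passed-in allConfigs list in place (B performs the same mutation).

-- ===== PORT A =====
-- dict lookup stereocenters[k]: first matching key; Pre_ guarantees the key is present
-- (on a missing key Python raises KeyError), so the [] default is never reached inside Pre_.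
def pvLookup (d : List (String × List Int)) (k : String) : List Int :=
  (List.lookup k d).getD []

-- the recursion of A; fuel = total - index (exact inside Pre_, where index ≤ total;
-- outside Pre_ the Python recurses forever). The append/recurse/pop backtracking on the
-- shared currentConfig is transcribed as passing cur ++ [stereo] to the recursive call.
def esRec (nC total : Int) (index : Int) (cur : List String)
    (acc : List (List String)) (fuel : Nat) : List (List String) :=
  if index = total then
    acc ++ [cur]
  else
    match fuel with
    | 0 => acc
    | f + 1 =>
      if index < nC then
        let acc1 := esRec nC total (index + 1) (cur ++ ["@"]) acc f
        esRec nC total (index + 1) (cur ++ ["@@"]) acc1 f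
      else
        let acc1 := esRec nC total (index + 1) (cur ++ ["/"]) acc f
        esRec nC total (index + 1) (cur ++ ["\\"]) acc1 f

def enumerateStereoisomers (elements : List String) (bonds : List (List Int)) (stereocenters : List (String × List Int)) (index : Int) (currentConfig : Option (List String)) (allConfigs : Option (List (List String))) : List (List String) :=
  let cur := currentConfig.getD []
  let acc := allConfigs.getD []
  let nC : Int := (pvLookup stereocenters "chiralCenters").length
  let total : Int := nC + (pvLookup stereocenters "doubleBonds").length
  esRec nC total index cur acc (total - index).toNat

-- ===== PORT B =====
def enumerateStereoisomers_alt (elements : List String) (bonds : List (List Int)) (stereocenters : List (String × List Int)) (index : Int) (currentConfig : Option (List String)) (allConfigs : Option (List (List String))) : List (List String) :=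
  let cur := currentConfig.getD []
  let acc := allConfigs.getD []
  let nC : Int := (pvLookup stereocenters "chiralCenters").length
  let total : Int := nC + (pvLookup stereocenters "doubleBonds").length
  let combos := (PySem.List.pyRange index total 1).foldl
    (fun combos i =>
      let choice : List String := if i < nC then ["@", "@@"] else ["/", "\\"]
      combos.flatMap (fun c => choice.map (fun s => c ++ [s]))) [[]]
  acc ++ combos.map (fun c => cur ++ c)

-- ===== PRECONDITION & SPEC =====
-- Pre_ excludes exactly the inputs where the Python A raises: a missing "chiralCenters" or
-- "doubleBonds" key (KeyError) and index > total number of stereocenters (infinite recursion).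
def Pre_enumerateStereoisomers (elements : List String) (bonds : List (List Int)) (stereocenters : List (String × List Int)) (index : Int) (currentConfig : Option (List String)) (allConfigs : Option (List (List String))) : Prop :=
  "chiralCenters" ∈ stereocenters.map Prod.fst ∧
  "doubleBonds" ∈ stereocenters.map Prod.fst ∧
  index ≤ ((pvLookup stereocenters "chiralCenters").length : Int) +
            ((pvLookup stereocenters "doubleBonds").length : Int)
instance (elements : List String) (bonds : List (List Int)) (stereocenters : List (String × List Int)) (index : Int) (currentConfig : Option (List String)) (allConfigs : Option (List (List String))) : Decidable (Pre_enumerateStereoisomers elements bonds stereocenters index currentConfig allConfigs) := by unfold Pre_enumerateStereoisomers; infer_instance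

def pvWitness_enumerateStereoisomers : List String × List (List Int) × (List (String × List Int)) × Int × Option (List String) × Option (List (List String)) :=
  (["C"], [[0, 1]], [("chiralCenters", [0]), ("doubleBonds", [])], 0, none, none)

def Spec_enumerateStereoisomers (elements : List String) (bonds : List (List Int)) (stereocenters : List (String × List Int)) (index : Int) (currentConfig : Option (List String)) (allConfigs : Option (List (List String))) (out : List (List String)) : Prop := out = enumerateStereoisomers_alt elements bonds stereocenters index currentConfig allConfigs
instance (elements : List String) (bonds : List (List Int)) (stereocenters : List (String × List Int)) (index : Int) (currentConfig : Option (List String)) (allConfigs : Option (List (List String))) (out : List (List String)) : Decidable (Spec_enumerateStereoisomers elements bonds stereocenters index currentConfig allConfigs out) := by unfold Spec_enumerateStereoisomers; infer_instance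

-- ===== CLAIM (what is proved, stated in full; the proofs are below) =====
def Claim_equal_enumerateStereoisomers : Prop := ∀ (elements : List String) (bonds : List (List Int)) (stereocenters : List (String × List Int)) (index : Int) (currentConfig : Option (List String)) (allConfigs : Option (List (List String))), Dom_enumerateStereoisomers elements bonds stereocenters index currentConfig allConfigs → Pre_enumerateStereoisomers elements bonds stereocenters index currentConfig allConfigs → Spec_enumerateStereoisomers elements bonds stereocenters index currentConfig allConfigs (enumerateStereoisomers elements bonds stereocenters index currentConfig allConfigs)


-- ===== LEMMAS AND PROOFS =====

-- the cartesian product of the remaining choices, by recursion on the remaining length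
def prodFrom (nC : Int) (fuel : Nat) (index : Int) : List (List String) :=
  match fuel with
  | 0 => [[]]
  | f + 1 =>
    (if index < nC then ["@", "@@"] else ["/", "\\"]).flatMap
      (fun s => (prodFrom nC f (index + 1)).map (fun c => s :: c))

theorem esRec_eq_prodFrom (nC total : Int) :
    ∀ (f : Nat) (index : Int) (cur : List String) (acc : List (List String)),
      index ≤ total → (total - index).toNat = f →
      esRec nC total index cur acc f = acc ++ (prodFrom nC f index).map (fun c => cur ++ c) := by
  intro f
  induction f with
  | zero =>
    intro index cur acc hle hf
    have : index = total := by omega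
    simp [esRec, this, prodFrom]
  | succ f ih =>
    intro index cur acc hle hf
    have hne : index ≠ total := by omega
    have hle' : index + 1 ≤ total := by omega
    have hf' : (total - (index + 1)).toNat = f := by omega
    rw [esRec, if_neg hne]
    by_cases h : index < nC
    · rw [if_pos h, ih (index + 1) (cur ++ ["@"]) acc hle' hf',
          ih (index + 1) (cur ++ ["@@"]) _ hle' hf']
      simp [prodFrom, h, List.map_map, Function.comp_def, List.append_assoc]
    · rw [if_neg h, ih (index + 1) (cur ++ ["/"]) acc hle' hf',
          ih (index + 1) (cur ++ ["\\"]) _ hle' hf']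
      simp [prodFrom, h, List.map_map, Function.comp_def, List.append_assoc]

theorem foldl_eq_prodFrom (nC total : Int) :
    ∀ (f : Nat) (index : Int) (init : List (List String)),
      index ≤ total → (total - index).toNat = f →
      (PySem.List.pyRange index total 1).foldl
        (fun combos i =>
          let choice : List String := if i < nC then ["@", "@@"] else ["/", "\\"]
          combos.flatMap (fun c => choice.map (fun s => c ++ [s]))) init
      = init.flatMap (fun c => (prodFrom nC f index).map (fun p => c ++ p)) := by
  intro f
  induction f with
  | zero =>
    intro index init hle hf
    have : total ≤ index := by omega
    rw [PySem.List.pyRange_one_eq_nil this]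
    simp [prodFrom]
  | succ f ih =>
    intro index init hle hf
    have hlt : index < total := by omega
    rw [PySem.List.pyRange_one_cons hlt, List.foldl_cons,
        ih (index + 1) _ (by omega) (by omega)]
    simp only [prodFrom, List.flatMap_assoc]
    congr 1
    funext c
    by_cases h : index < nC <;>
      simp [h, Function.comp_def, List.map_map, List.append_assoc]

-- ===== VERDICT (by name: the statement is the Claim_ definition above) =====
theorem enumerateStereoisomers_spec : Claim_equal_enumerateStereoisomers := by
  intro elements bonds stereocenters index currentConfig allConfigs _ hPre
  unfold Spec_enumerateStereoisomers enumerateStereoisomers enumerateStereoisomers_alt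
  obtain ⟨-, -, hle⟩ := hPre
  dsimp only
  rw [esRec_eq_prodFrom _ _ _ _ _ _ hle rfl,
      foldl_eq_prodFrom _ _ ((((pvLookup stereocenters "chiralCenters").length : Int) +
        ((pvLookup stereocenters "doubleBonds").length : Int) - index).toNat) _ _ hle rfl]
  simp
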